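-- pv_equiv track=rewrite | github.com/Obelus-Labs-LLC/WeThePeople | jobs/sync_it_dashboard.py | _match_vendor
-- ===== SOURCE A (Python) =====
-- def _match_vendor(vendor_name: str, lookup: dict) -> str:
--     """Fuzzy match a vendor name to a tracked company ID."""
--     if not vendor_name:
--         return ""
--
--     vn_lower = vendor_name.lower().strip()
--
--     # Exact match
--     if vn_lower in lookup:
--         return lookup[vn_lower]
--
--     # Substring match — check if any tracked company name is IN the vendor name
--     for company_name, company_id in lookup.items():
--         if len(company_name) >= 4 and company_name in vn_lower:
--             return company_id
--
--     # Check if vendor name is IN any tracked company name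
--     for company_name, company_id in lookup.items():
--         if len(vn_lower) >= 4 and vn_lower in company_name:
--             return company_id
--
--     return ""
-- ===== SOURCE B (Python) =====
-- def _match_vendor(vendor_name: str, lookup: dict) -> str:
--     """Fuzzy match a vendor name to a tracked company ID (single pass)."""
--     if not vendor_name:
--         return ""
--
--     vn_lower = vendor_name.lower().strip()
--
--     sub_hit = None   # first company name contained in the vendor name
--     sup_hit = None   # first company name containing the vendor name
--     for company_name, company_id in lookup.items():
--         if company_name == vn_lower:
--             return company_id
--         if sub_hit is None and len(company_name) >= 4 and company_name in vn_lower: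
--             sub_hit = company_id
--         if sup_hit is None and len(vn_lower) >= 4 and vn_lower in company_name:
--             sup_hit = company_id
--
--     if sub_hit is not None:
--         return sub_hit
--     if sup_hit is not None:
--         return sup_hit
--     return ""
-- ===== Notes on version B (the rewrite author's own statement) =====
-- stated objective: alternative
-- what changed: Replaces A's three sequential dict scans (exact membership + two substring passes) with one loop that returns on an exact key and records the first candidate of each substring direction in pending variables, resolved by priority after the loop.
import Mathlib
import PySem

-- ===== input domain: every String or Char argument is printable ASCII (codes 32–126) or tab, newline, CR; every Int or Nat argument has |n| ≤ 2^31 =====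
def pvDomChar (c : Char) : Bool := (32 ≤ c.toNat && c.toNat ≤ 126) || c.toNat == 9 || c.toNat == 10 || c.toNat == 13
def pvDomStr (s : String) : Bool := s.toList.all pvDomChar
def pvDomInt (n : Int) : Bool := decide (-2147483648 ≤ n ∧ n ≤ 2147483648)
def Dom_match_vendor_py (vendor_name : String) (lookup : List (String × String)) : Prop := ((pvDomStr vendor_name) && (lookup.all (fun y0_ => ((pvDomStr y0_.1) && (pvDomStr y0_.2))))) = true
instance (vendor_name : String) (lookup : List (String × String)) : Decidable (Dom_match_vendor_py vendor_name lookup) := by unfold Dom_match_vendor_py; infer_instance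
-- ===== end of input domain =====

-- B collapses A's three sequential scans of the dict into a single loop with pending candidates; alternative decomposition, same cost.

-- ===== PORT A =====
-- dict → association list, first match; the three scans of A are the three find?s, in A's order
def match_vendor_py (vendor_name : String) (lookup : List (String × String)) : String :=
  if vendor_name == "" then ""
  else
    let vn := PySem.Str.strip (PySem.Str.lower vendor_name)
    -- exact match: 'if vn_lower in lookup: return lookup[vn_lower]'
    match lookup.find? (fun p => p.1 == vn) with
    | some p => p.2
    | none =>
      -- 'for company_name, company_id in lookup.items(): if len >= 4 and company_name in vn_lower'
      match lookup.find? (fun p => decide (4 ≤ PySem.Str.len p.1) && PySem.Str.isIn p.1 vn) with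
      | some p => p.2
      | none =>
        -- 'for company_name, company_id in lookup.items(): if len(vn_lower) >= 4 and vn_lower in company_name'
        match lookup.find? (fun p => decide (4 ≤ PySem.Str.len vn) && PySem.Str.isIn vn p.1) with
        | some p => p.2
        | none => ""

-- ===== PORT B =====
-- the single loop of Source B: return on exact key, remember the first candidate of each kind
def matchVendorAltLoop (vn : String) (l : List (String × String))
    (sub sup : Option String) : String :=
  match l with
  | [] =>
    match sub with
    | some c => c
    | none =>
      match sup with
      | some c => c
      | none => ""
  | (name, cid) :: rest =>
    if name == vn then cid
    else
      let sub' := if sub.isNone && decide (4 ≤ PySem.Str.len name) && PySem.Str.isIn name vn then some cid else sub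
      let sup' := if sup.isNone && decide (4 ≤ PySem.Str.len vn) && PySem.Str.isIn vn name then some cid else sup
      matchVendorAltLoop vn rest sub' sup'

def match_vendor_py_alt (vendor_name : String) (lookup : List (String × String)) : String :=
  if vendor_name == "" then ""
  else
    let vn := PySem.Str.strip (PySem.Str.lower vendor_name)
    matchVendorAltLoop vn lookup none none

-- ===== PRECONDITION & SPEC =====
def Spec_match_vendor_py (vendor_name : String) (lookup : List (String × String)) (out : String) : Prop := out = match_vendor_py_alt vendor_name lookup
instance (vendor_name : String) (lookup : List (String × String)) (out : String) : Decidable (Spec_match_vendor_py vendor_name lookup out) := by unfold Spec_match_vendor_py; infer_instance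

-- ===== CLAIM (what is proved, stated in full; the proofs are below) =====
def Claim_equal_match_vendor_py : Prop := ∀ (vendor_name : String) (lookup : List (String × String)), Dom_match_vendor_py vendor_name lookup → Spec_match_vendor_py vendor_name lookup (match_vendor_py vendor_name lookup)

-- ===== LEMMAS AND PROOFS =====

-- 'match o.map (·.2)' unpacked to a match on o
theorem matchMapSnd (o : Option (String × String)) (d : String) :
    (match o.map (fun p => p.2) with | some c => c | none => d)
      = (match o with | some p => p.2 | none => d) := by
  cases o <;> rfl

-- characterisation of the single loop in terms of A's three scans
theorem matchVendorAltLoop_eq (vn : String) (l : List (String × String)) :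
    ∀ (sub sup : Option String),
    matchVendorAltLoop vn l sub sup =
      match l.find? (fun p => p.1 == vn) with
      | some p => p.2
      | none =>
        match sub.or ((l.find? (fun p => decide (4 ≤ PySem.Str.len p.1) && PySem.Str.isIn p.1 vn)).map (fun p => p.2)) with
        | some c => c
        | none =>
          match sup.or ((l.find? (fun p => decide (4 ≤ PySem.Str.len vn) && PySem.Str.isIn vn p.1)).map (fun p => p.2)) with
          | some c => c
          | none => "" := by
  induction l with
  | nil =>
    intro sub sup
    simp [matchVendorAltLoop]
  | cons hd tl ih =>
    intro sub sup
    obtain ⟨name, cid⟩ := hd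
    cases hx : (name == vn) with
    | true =>
      simp only [matchVendorAltLoop, hx, if_pos, List.find?]
    | false =>
      simp only [matchVendorAltLoop, hx, Bool.false_eq_true, if_neg, not_false_eq_true]
      rw [ih]
      simp only [List.find?, hx]
      cases h1 : (decide (4 ≤ PySem.Str.len name) && PySem.Str.isIn name vn) <;>
        cases h2 : (decide (4 ≤ PySem.Str.len vn) && PySem.Str.isIn vn name) <;>
        cases sub <;> cases sup <;>
        simp only [h1, h2, Option.isNone_none, Option.isNone_some, Bool.true_and, Bool.false_and,
          if_true, if_false, Bool.false_eq_true, Option.map_some,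
          Option.or_some, Option.some_or, Option.none_or, Option.getD_some, Option.getD_none]

theorem match_vendor_py_spec : Claim_equal_match_vendor_py := by
  intro vendor_name lookup _
  unfold Spec_match_vendor_py match_vendor_py match_vendor_py_alt
  cases he : (vendor_name == "") with
  | true => simp only [if_pos]
  | false =>
    simp only [Bool.false_eq_true, if_neg, not_false_eq_true]
    rw [matchVendorAltLoop_eq]
    simp only [Option.none_or, matchMapSnd]
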